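-- pv_equiv track=rewrite | github.com/strikerdlm/hexoskin-wav-analyzer | src/hrv_analysis/enhanced_hrv_analysis/stats/advanced_statistics.py | _recommend_best_model
-- ===== SOURCE A (Python) =====
-- def _recommend_best_model(best_aic: str, best_bic: str, best_r_squared: str) -> str:
--     """Recommend the best model based on multiple criteria."""
--     # Count votes for each model
--     votes = {}
--     for model in [best_aic, best_bic, best_r_squared]:
--         votes[model] = votes.get(model, 0) + 1
--
--     # Find model with most votes
--     best_model = max(votes, key=votes.get)
--
--     if votes[best_model] >= 2:
--         return best_model
--     else:
--         # If tie, prefer model with best AIC (better for prediction)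
--         return best_aic
-- ===== SOURCE B (Python) =====
-- def _recommend_best_model(best_aic: str, best_bic: str, best_r_squared: str) -> str:
--     """Recommend the best model: majority of three criteria, AIC wins ties."""
--     if best_aic == best_bic or best_aic == best_r_squared:
--         return best_aic
--     if best_bic == best_r_squared:
--         return best_bic
--     return best_aic
-- ===== Notes on version B (the rewrite author's own statement) =====
-- stated objective: simpler
-- what changed: Replaced the vote dict, the max-with-key argmax and the count check by three direct pairwise equality comparisons (a three-way majority reduces to them), preserving A's first-inserted tie-break.
import Mathlib
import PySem

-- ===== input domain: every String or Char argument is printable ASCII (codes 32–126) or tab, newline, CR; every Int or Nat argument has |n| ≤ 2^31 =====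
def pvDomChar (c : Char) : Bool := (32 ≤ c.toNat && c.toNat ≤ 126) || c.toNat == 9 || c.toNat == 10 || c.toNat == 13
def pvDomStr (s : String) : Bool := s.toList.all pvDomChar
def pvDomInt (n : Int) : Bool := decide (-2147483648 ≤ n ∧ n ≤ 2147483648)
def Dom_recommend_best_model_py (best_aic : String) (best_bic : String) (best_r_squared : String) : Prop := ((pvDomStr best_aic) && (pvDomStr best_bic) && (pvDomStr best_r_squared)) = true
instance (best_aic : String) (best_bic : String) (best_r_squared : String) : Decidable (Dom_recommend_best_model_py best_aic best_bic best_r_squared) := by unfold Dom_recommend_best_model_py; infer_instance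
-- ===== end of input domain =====

-- B replaces A's vote dict + argmax by three pairwise equality checks (simpler decomposition, same value everywhere).

-- ===== PORT A =====
-- literal port: build the votes dict, take max(votes, key=votes.get), check its count.
-- votes is nonempty by construction, so the `.getD best_aic` default of max? is never used.
def recommend_best_model_py (best_aic : String) (best_bic : String) (best_r_squared : String) : String :=
  let votes : PySem.Dict String Int :=
    [best_aic, best_bic, best_r_squared].foldl
      (fun d m => d.insert m (d.getD m 0 + 1)) PySem.Dict.empty
  let best_model := (PySem.List.max? votes.keys (fun k => votes.getD k 0)).getD best_aic
  if votes.getD best_model 0 ≥ 2 then best_model else best_aic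

-- ===== PORT B =====
def recommend_best_model_py_alt (best_aic : String) (best_bic : String) (best_r_squared : String) : String :=
  if best_aic = best_bic ∨ best_aic = best_r_squared then best_aic
  else if best_bic = best_r_squared then best_bic
  else best_aic

-- ===== PRECONDITION & SPEC =====
def Spec_recommend_best_model_py (best_aic : String) (best_bic : String) (best_r_squared : String) (out : String) : Prop := out = recommend_best_model_py_alt best_aic best_bic best_r_squared
instance (best_aic : String) (best_bic : String) (best_r_squared : String) (out : String) : Decidable (Spec_recommend_best_model_py best_aic best_bic best_r_squared out) := by unfold Spec_recommend_best_model_py; infer_instance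

-- ===== CLAIM (what is proved, stated in full; the proofs are below) =====
def Claim_equal_recommend_best_model_py : Prop := ∀ (best_aic : String) (best_bic : String) (best_r_squared : String), Dom_recommend_best_model_py best_aic best_bic best_r_squared → Spec_recommend_best_model_py best_aic best_bic best_r_squared (recommend_best_model_py best_aic best_bic best_r_squared)

-- ===== LEMMAS AND PROOFS =====

-- ===== VERDICT (by name: the statement is the Claim_ definition above) =====
theorem recommend_best_model_py_spec : Claim_equal_recommend_best_model_py := by
  intro a b r _
  show recommend_best_model_py a b r = recommend_best_model_py_alt a b r
  by_cases h1 : a = b <;> by_cases h2 : a = r <;> by_cases h3 : b = r <;>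
    simp_all [recommend_best_model_py, recommend_best_model_py_alt,
      PySem.Dict.insert, PySem.Dict.getD, PySem.Dict.get?, PySem.Dict.empty,
      PySem.Dict.keys, PySem.List.max?]
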